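-- pv_equiv track=rewrite | github.com/bruno-fs/genial | megFinder.py | countMicExTandem
-- ===== SOURCE A (Python) =====
-- def countMicExTandem(exons, MicEx=36, simmetric=True):
--     """return the max sequence $\mu$Ex in tandem on the given array (of exons)
--     if simmetric is set to True, the $\mu$Ex must also be simmetric"""
--     c_max = c = 0
--
--     def isSimmetric(x):
--         if x%3 == 0:
--             return True
--         else:
--             return False
--
--     for Ex in exons:
--         if Ex <= MicEx:
--             c += 1
--             if simmetric and not isSimmetric(Ex):
--                 c = 0
--         else:
--             c = 0
--         if c > c_max:
--             c_max = c
--     return c_max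
-- ===== SOURCE B (Python) =====
-- def countMicExTandem(exons, MicEx=36, simmetric=True):
--     """Gap decomposition: the disqualifying positions (plus virtual boundaries
--     -1 and len) bound the tandem runs; the answer is the largest gap minus 1."""
--     flags = [Ex <= MicEx and (not simmetric or Ex % 3 == 0) for Ex in exons]
--     bad = [i for i, f in enumerate(flags) if not f]
--     bounds = [-1] + bad + [len(flags)]
--     return max(b - a - 1 for a, b in zip(bounds, bounds[1:]))
-- ===== Notes on version B (the rewrite author's own statement) =====
-- stated objective: simpler
-- what changed: Replaces A's stateful running-counter-with-reset loop by a gap decomposition: compute the qualifying flags, collect the positions of disqualifying exons plus two virtual boundaries, and return the largest gap between consecutive boundaries minus one.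
import Mathlib
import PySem

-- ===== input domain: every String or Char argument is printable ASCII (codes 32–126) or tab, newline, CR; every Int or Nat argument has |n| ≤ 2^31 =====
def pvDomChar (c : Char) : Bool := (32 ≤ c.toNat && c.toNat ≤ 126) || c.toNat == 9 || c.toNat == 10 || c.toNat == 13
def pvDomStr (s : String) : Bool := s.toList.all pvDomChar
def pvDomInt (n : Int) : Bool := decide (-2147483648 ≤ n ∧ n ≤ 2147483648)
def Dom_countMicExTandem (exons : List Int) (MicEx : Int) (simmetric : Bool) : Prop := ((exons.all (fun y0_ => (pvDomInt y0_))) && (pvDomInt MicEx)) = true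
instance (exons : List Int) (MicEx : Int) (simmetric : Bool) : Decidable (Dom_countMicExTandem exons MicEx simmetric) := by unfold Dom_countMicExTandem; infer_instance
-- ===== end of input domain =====

-- B replaces A's running-counter/reset scan by a gap decomposition (largest gap
-- between consecutive disqualifying positions); objective: simpler.

-- ===== PORT A =====
def pvIsSimmetricA (x : Int) : Bool :=
  if PySem.Int.mod x 3 == 0 then true else false

def pvStepA (MicEx : Int) (simmetric : Bool) (st : Int × Int) (Ex : Int) : Int × Int :=
  let c :=
    if Ex ≤ MicEx then
      let c1 := st.2 + 1
      if simmetric && !(pvIsSimmetricA Ex) then 0 else c1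
    else 0
  (if c > st.1 then c else st.1, c)

def countMicExTandem (exons : List Int) (MicEx : Int) (simmetric : Bool) : Int :=
  (exons.foldl (pvStepA MicEx simmetric) (0, 0)).1

-- ===== PORT B =====
def countMicExTandem_alt (exons : List Int) (MicEx : Int) (simmetric : Bool) : Int :=
  let flags := exons.map (fun Ex => decide (Ex ≤ MicEx) && (!simmetric || PySem.Int.mod Ex 3 == 0))
  let bad := ((PySem.List.enumerate flags 0).filter (fun p => !p.2)).map (·.1)
  let bounds := -1 :: bad ++ [(flags.length : Int)]
  -- bounds has ≥ 2 elements, so the gaps list is nonempty and Python's max never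
  -- raises; max(iterable) is PySem.List.max? (getD 0 is never taken).
  (PySem.List.max? ((bounds.zip bounds.tail).map (fun p => p.2 - p.1 - 1)) (fun y => y)).getD 0

-- ===== PRECONDITION & SPEC =====
def Spec_countMicExTandem (exons : List Int) (MicEx : Int) (simmetric : Bool) (out : Int) : Prop := out = countMicExTandem_alt exons MicEx simmetric
instance (exons : List Int) (MicEx : Int) (simmetric : Bool) (out : Int) : Decidable (Spec_countMicExTandem exons MicEx simmetric out) := by unfold Spec_countMicExTandem; infer_instance

-- ===== CLAIM (what is proved, stated in full; the proofs are below) =====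
def Claim_equal_countMicExTandem : Prop := ∀ (exons : List Int) (MicEx : Int) (simmetric : Bool), Dom_countMicExTandem exons MicEx simmetric → Spec_countMicExTandem exons MicEx simmetric (countMicExTandem exons MicEx simmetric)

-- ===== LEMMAS AND PROOFS =====

/-- the qualifying predicate both programs test -/
def pvQual (MicEx : Int) (simmetric : Bool) (Ex : Int) : Bool :=
  decide (Ex ≤ MicEx) && (!simmetric || PySem.Int.mod Ex 3 == 0)

/-- length of the qualifying prefix run -/
def pvHeadRun : List Bool → Int
  | [] => 0
  | b :: t => if b then 1 + pvHeadRun t else 0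

/-- longest qualifying run anywhere -/
def pvBest : List Bool → Int
  | [] => 0
  | b :: t => max (if b then 1 + pvHeadRun t else 0) (pvBest t)

theorem pvHeadRun_nonneg (l : List Bool) : 0 ≤ pvHeadRun l := by
  induction l with
  | nil => simp [pvHeadRun]
  | cons b t ih => simp only [pvHeadRun]; split <;> omega

theorem pvBest_nonneg (l : List Bool) : 0 ≤ pvBest l := by
  induction l with
  | nil => simp [pvBest]
  | cons b t ih => simp only [pvBest]; omega

theorem pvHeadRun_le_best (l : List Bool) : pvHeadRun l ≤ pvBest l := by
  cases l with
  | nil => simp [pvHeadRun, pvBest]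
  | cons b t => simp only [pvHeadRun, pvBest]; omega

-- ---------- A side ----------

theorem pvStepA_eq (MicEx : Int) (simmetric : Bool) (st : Int × Int) (Ex : Int)
    (h : 0 ≤ st.2 ∧ st.2 ≤ st.1) :
    pvStepA MicEx simmetric st Ex =
      (max st.1 (if pvQual MicEx simmetric Ex then st.2 + 1 else 0),
       if pvQual MicEx simmetric Ex then st.2 + 1 else 0) := by
  unfold pvStepA pvQual pvIsSimmetricA
  by_cases hle : Ex ≤ MicEx <;> by_cases hm : PySem.Int.mod Ex 3 == 0 <;>
    cases simmetric <;> simp [hle, hm] <;> omega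

theorem pvFoldA (MicEx : Int) (simmetric : Bool) :
    ∀ (exons : List Int) (cmax c : Int), 0 ≤ c → c ≤ cmax →
      (exons.foldl (pvStepA MicEx simmetric) (cmax, c)).1 =
        max cmax (max (c + pvHeadRun (exons.map (pvQual MicEx simmetric)))
                      (pvBest (exons.map (pvQual MicEx simmetric)))) := by
  intro exons
  induction exons with
  | nil => intro cmax c h0 h1; simp [pvHeadRun, pvBest]; omega
  | cons x t ih =>
    intro cmax c h0 h1
    have hstep := pvStepA_eq MicEx simmetric (cmax, c) x ⟨h0, h1⟩
    simp only [List.foldl_cons, hstep, List.map_cons]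
    by_cases hq : pvQual MicEx simmetric x = true
    · simp only [hq, if_true]
      rw [ih (max cmax (c + 1)) (c + 1) (by omega) (by omega)]
      simp only [pvHeadRun, pvBest, if_true]
      have h2 := pvHeadRun_nonneg (t.map (pvQual MicEx simmetric))
      have h3 := pvHeadRun_le_best (t.map (pvQual MicEx simmetric))
      omega
    · have hq' : pvQual MicEx simmetric x = false := by simpa using hq
      simp only [hq', Bool.false_eq_true, if_false]
      rw [ih (max cmax 0) 0 le_rfl (le_max_right _ _)]
      simp only [pvHeadRun, pvBest, Bool.false_eq_true, if_false]
      have h2 := pvHeadRun_nonneg (t.map (pvQual MicEx simmetric))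
      have h3 := pvHeadRun_le_best (t.map (pvQual MicEx simmetric))
      have h4 := pvBest_nonneg (t.map (pvQual MicEx simmetric))
      omega

theorem pvA_eq_best (exons : List Int) (MicEx : Int) (simmetric : Bool) :
    countMicExTandem exons MicEx simmetric =
      pvBest (exons.map (pvQual MicEx simmetric)) := by
  unfold countMicExTandem
  rw [pvFoldA MicEx simmetric exons 0 0 le_rfl le_rfl]
  have h2 := pvHeadRun_nonneg (exons.map (pvQual MicEx simmetric))
  have h3 := pvHeadRun_le_best (exons.map (pvQual MicEx simmetric))
  have h4 := pvBest_nonneg (exons.map (pvQual MicEx simmetric))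
  omega

-- ---------- B side ----------

/-- the gaps list B computes, with a general previous boundary `prev` and start index `k` -/
def pvGaps (prev k : Int) (flags : List Bool) : List Int :=
  let bad := ((PySem.List.enumerate flags k).filter (fun p => !p.2)).map (·.1)
  let bounds := prev :: bad ++ [k + (flags.length : Int)]
  (bounds.zip bounds.tail).map (fun p => p.2 - p.1 - 1)

/-- B's computation with general boundaries -/
def pvBgen (prev k : Int) (flags : List Bool) : Int :=
  (PySem.List.max? (pvGaps prev k flags) (fun y => y)).getD 0

theorem pvGaps_nil (prev k : Int) : pvGaps prev k [] = [k - prev - 1] := by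
  simp [pvGaps, PySem.List.enumerate]

theorem pvGaps_true (prev k : Int) (t : List Bool) :
    pvGaps prev k (true :: t) = pvGaps prev (k + 1) t := by
  have hc : k + ((t.length : Int) + 1) = k + 1 + (t.length : Int) := by ring
  simp only [pvGaps, PySem.List.enumerate_cons, List.filter_cons, List.length_cons]
  norm_num
  rw [hc]

theorem pvGaps_false (prev k : Int) (t : List Bool) :
    pvGaps prev k (false :: t) = (k - prev - 1) :: pvGaps k (k + 1) t := by
  have hc : k + ((t.length : Int) + 1) = k + 1 + (t.length : Int) := by ring
  simp only [pvGaps, PySem.List.enumerate_cons, List.filter_cons, List.length_cons]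
  norm_num
  rw [hc]

theorem pvGaps_ne_nil (flags : List Bool) : ∀ prev k : Int, pvGaps prev k flags ≠ [] := by
  induction flags with
  | nil => intro prev k; simp [pvGaps_nil]
  | cons b t ih =>
    intro prev k
    cases b
    · simp [pvGaps_false]
    · rw [pvGaps_true]; exact ih prev (k + 1)

theorem pvFoldl_max_comm (l : List Int) : ∀ a b : Int,
    l.foldl max (max a b) = max a (l.foldl max b) := by
  induction l with
  | nil => intro a b; simp
  | cons c t ih => intro a b; simpa [max_assoc] using ih a (max b c)

/-- evaluate Python max on a nonempty list -/
theorem pvMx_cons (a : Int) (rest : List Int) (h : rest ≠ []) :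
    (PySem.List.max? (a :: rest) (fun y => y)).getD 0 =
      max a ((PySem.List.max? rest (fun y => y)).getD 0) := by
  obtain ⟨r, rt, rfl⟩ := List.exists_cons_of_ne_nil h
  rw [PySem.List.max?_id_cons, PySem.List.max?_id_cons]
  simp only [Option.getD_some, List.foldl_cons]
  exact pvFoldl_max_comm rt a r

theorem pvBgen_eq (flags : List Bool) : ∀ prev k : Int, prev + 1 ≤ k →
    pvBgen prev k flags = max (k - prev - 1 + pvHeadRun flags) (pvBest flags) := by
  induction flags with
  | nil =>
    intro prev k h
    rw [pvBgen, pvGaps_nil, PySem.List.max?_id_cons]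
    simp only [List.foldl_nil, Option.getD_some, pvHeadRun, pvBest]
    omega
  | cons b t ih =>
    intro prev k h
    cases b with
    | true =>
      rw [pvBgen, pvGaps_true, ← pvBgen, ih prev (k + 1) (by omega)]
      simp only [pvHeadRun, pvBest, if_true]
      have h2 := pvHeadRun_nonneg t
      have h3 := pvHeadRun_le_best t
      omega
    | false =>
      rw [pvBgen, pvGaps_false, pvMx_cons _ _ (pvGaps_ne_nil t k (k + 1)), ← pvBgen,
        ih k (k + 1) (by omega)]
      simp only [pvHeadRun, pvBest, Bool.false_eq_true, if_false]
      have h2 := pvHeadRun_nonneg t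
      have h3 := pvHeadRun_le_best t
      have h4 := pvBest_nonneg t
      omega

theorem pvB_eq_best (exons : List Int) (MicEx : Int) (simmetric : Bool) :
    countMicExTandem_alt exons MicEx simmetric =
      pvBest (exons.map (pvQual MicEx simmetric)) := by
  have halt : countMicExTandem_alt exons MicEx simmetric =
      pvBgen (-1) 0 (exons.map (pvQual MicEx simmetric)) := by
    have hq : (fun Ex => decide (Ex ≤ MicEx) && (!simmetric || PySem.Int.mod Ex 3 == 0)) =
        pvQual MicEx simmetric := rfl
    simp only [countMicExTandem_alt, pvBgen, pvGaps, hq]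
    norm_num
  rw [halt, pvBgen_eq _ (-1) 0 (by norm_num)]
  have h3 := pvHeadRun_le_best (exons.map (pvQual MicEx simmetric))
  have h4 := pvBest_nonneg (exons.map (pvQual MicEx simmetric))
  omega

-- ===== VERDICT (by name: the statement is the Claim_ definition above) =====
theorem countMicExTandem_spec : Claim_equal_countMicExTandem := by
  intro exons MicEx simmetric _
  unfold Spec_countMicExTandem
  rw [pvA_eq_best, pvB_eq_best]
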